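-- pv_equiv track=rewrite | github.com/miliar/Code_Jam_Webscraper | Solutions_python/Problem_155/1730.py | solve
-- ===== SOURCE A (Python) =====
-- def solve(shy_string):
--     num_guests = num_standing = 0
--     for shy_level, num_audience in enumerate(shy_string):
--         if num_standing >= shy_level:
--             num_standing += int(num_audience)
--         elif num_audience != '0':
--             num_guests += shy_level - num_standing
--             num_standing += (int(num_audience) + shy_level - num_standing)
--     return num_guests
-- ===== SOURCE B (Python) =====
-- def solve(shy_string):
--     seen = needed = 0
--     for level, ch in enumerate(shy_string):
--         if ch != '0':
--             needed = max(needed, level - seen)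
--         seen += int(ch)
--     return needed
-- ===== Notes on version B (the rewrite author's own statement) =====
-- stated objective: simpler
-- what changed: B replaces A's greedy simulation of the standing crowd (adding imaginary guests and jumping the standing count) with a prefix-sum scan that tracks the audience seen so far and returns the maximum deficit level - seen over non-zero digits.
import Mathlib
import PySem

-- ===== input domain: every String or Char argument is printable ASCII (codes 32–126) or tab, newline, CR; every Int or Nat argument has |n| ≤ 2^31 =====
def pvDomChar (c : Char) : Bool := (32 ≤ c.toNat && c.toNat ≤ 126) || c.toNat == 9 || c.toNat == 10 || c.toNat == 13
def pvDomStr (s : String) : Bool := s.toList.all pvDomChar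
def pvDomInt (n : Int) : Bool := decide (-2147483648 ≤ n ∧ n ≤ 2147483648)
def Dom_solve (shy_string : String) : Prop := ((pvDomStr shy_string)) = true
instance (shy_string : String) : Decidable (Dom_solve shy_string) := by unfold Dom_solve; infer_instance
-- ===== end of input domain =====

-- B replaces A's greedy standing-crowd simulation by a prefix-sum / max-deficit scan (simpler); proved equal on digit strings.


-- ===== PORT A =====
-- int(ch) for a one-character string; exact on the digit characters admitted by Pre_solve
def pyIntChar (c : Char) : Int := (PySem.Int.ofStr? (String.mk [c])).getD 0

def solveLoopA : List Char → Int → Int → Int → Int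
  | [], _, num_guests, _ => num_guests
  | c :: rest, shy_level, num_guests, num_standing =>
    if num_standing ≥ shy_level then
      solveLoopA rest (shy_level + 1) num_guests (num_standing + pyIntChar c)
    else if c ≠ '0' then
      solveLoopA rest (shy_level + 1) (num_guests + (shy_level - num_standing))
        (num_standing + (pyIntChar c + shy_level - num_standing))
    else
      solveLoopA rest (shy_level + 1) num_guests num_standing

def solve (shy_string : String) : Int :=
  solveLoopA shy_string.toList 0 0 0

-- ===== PORT B =====
def solveLoopB : List Char → Int → Int → Int → Int
  | [], _, _, needed => needed
  | c :: rest, level, seen, needed =>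
    let needed' := if c ≠ '0' then max needed (level - seen) else needed
    solveLoopB rest (level + 1) (seen + pyIntChar c) needed'

def solve_alt (shy_string : String) : Int :=
  solveLoopB shy_string.toList 0 0 0

-- ===== PRECONDITION & SPEC =====
-- Pre_: both Pythons raise ValueError (int(ch)) as soon as a non-digit character is reached.
def Pre_solve (shy_string : String) : Prop := shy_string.toList.all Char.isDigit = true
instance (shy_string : String) : Decidable (Pre_solve shy_string) := by unfold Pre_solve; infer_instance
def pvWitness_solve : String := "11000100"

def Spec_solve (shy_string : String) (out : Int) : Prop := out = solve_alt shy_string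
instance (shy_string : String) (out : Int) : Decidable (Spec_solve shy_string out) := by unfold Spec_solve; infer_instance

-- ===== CLAIM (what is proved, stated in full; the proofs are below) =====
def Claim_equal_solve : Prop := ∀ (shy_string : String), Dom_solve shy_string → Pre_solve shy_string → Spec_solve shy_string (solve shy_string)

-- ===== LEMMAS AND PROOFS =====
-- Invariant: A's state (guests, standing) equals (needed, seen + needed) of B.
theorem solveLoop_eq (l : List Char) : ∀ (i seen needed : Int),
    solveLoopA l i needed (seen + needed) = solveLoopB l i seen needed := by
  induction l with
  | nil => intro i seen needed; rfl
  | cons c rest ih =>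
    intro i seen needed
    simp only [solveLoopA, solveLoopB]
    by_cases hge : seen + needed ≥ i
    · rw [if_pos hge]
      have h1 : seen + needed + pyIntChar c = (seen + pyIntChar c) + needed := by ring
      have h2 : (if c ≠ '0' then max needed (i - seen) else needed) = needed := by
        split <;> [omega; rfl]
      rw [h1, ih, h2]
    · rw [if_neg hge]
      by_cases hc : c ≠ '0'
      · rw [if_pos hc]
        have h1 : needed + (i - (seen + needed)) = i - seen := by ring
        have h2 : seen + needed + (pyIntChar c + i - (seen + needed))
            = (seen + pyIntChar c) + (i - seen) := by ring
        have h3 : (if c ≠ '0' then max needed (i - seen) else needed) = i - seen := by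
          rw [if_pos hc]; omega
        rw [h1, h2, ih, h3]
      · rw [if_neg hc]
        have hc0 : c = '0' := by simpa using hc
        have h2 : (if c ≠ '0' then max needed (i - seen) else needed) = needed := by
          rw [if_neg hc]
        have h0 : pyIntChar '0' = 0 := by decide
        rw [h2, hc0, h0, add_zero]
        exact ih (i + 1) seen needed

-- ===== VERDICT (by name: the statement is the Claim_ definition above) =====
theorem solve_spec : Claim_equal_solve := by
  intro s _ _
  unfold Spec_solve solve solve_alt
  simpa using solveLoop_eq s.toList 0 0 0
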